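-- pv_equiv track=rewrite | github.com/AP2020MU/cpystal | cpystal/tex/tex.py | contract_numbers
-- ===== SOURCE A (Python) =====
-- def contract_numbers(nums: list[int]) -> str:
--     """Contract citation numbers.
--
--     Args:
--         nums (list[int]): Integers. In general, not sorted.
--
--     Returns:
--         str: Contracted numbers.
--
--     Examples:
--         `contract_numbers([4,7,1,9,8,2])`
--         >>> "1-2, 4, 7-9"
--     """
--     nums = sorted(nums)
--     if len(nums) == 0:
--         return ""
--     res: list[str] = []
--     start: int = nums[0]
--     now: int = nums[0]
--     for i in range(1, len(nums)):
--         if nums[i] - now == 1: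
--             pass
--         else:
--             if start == now:
--                 res.append(str(now))
--             else:
--                 res.append(f"{start}-{now}")
--             start = nums[i]
--         now = nums[i]
--     if start == now:
--         res.append(str(now))
--     else:
--         res.append(f"{start}-{now}")
--     return ", ".join(res)
-- ===== SOURCE B (Python) =====
-- def contract_numbers(nums: list[int]) -> str:
--     """Contract citation numbers, staged: compute the cut positions of the
--     sorted list (indices where a run ends), pair adjacent cuts, and format
--     each slice s[a:b] from its endpoints."""
--     s = sorted(nums)
--     n = len(s)
--     cuts = [i for i in range(n + 1) if i == 0 or i == n or s[i] - s[i - 1] != 1]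
--     parts = []
--     for a, b in zip(cuts, cuts[1:]):
--         first, last = s[a], s[b - 1]
--         parts.append(str(first) if first == last else f"{first}-{last}")
--     return ", ".join(parts)
-- ===== Notes on version B (the rewrite author's own statement) =====
-- stated objective: alternative
-- what changed: B replaces A's start/now state-machine scan by a staged index-based formulation: it computes the list of cut positions of the sorted list (indices where a new run begins), pairs adjacent cuts with zip, and formats each slice from its two endpoint elements.
import Mathlib
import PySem

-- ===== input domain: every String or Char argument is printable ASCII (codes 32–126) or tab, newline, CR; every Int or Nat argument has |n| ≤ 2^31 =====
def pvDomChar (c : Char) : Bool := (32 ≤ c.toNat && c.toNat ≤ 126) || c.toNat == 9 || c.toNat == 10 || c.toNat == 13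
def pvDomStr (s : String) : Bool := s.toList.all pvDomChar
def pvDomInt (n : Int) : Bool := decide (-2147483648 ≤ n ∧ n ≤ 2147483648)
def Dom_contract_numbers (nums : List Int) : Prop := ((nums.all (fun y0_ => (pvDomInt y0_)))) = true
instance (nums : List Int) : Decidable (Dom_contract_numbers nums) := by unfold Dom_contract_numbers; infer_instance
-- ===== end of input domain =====

-- B replaces A's start/now state machine by a staged formulation: compute the cut
-- positions of the sorted list, pair adjacent cuts, format each slice. Objective: simpler.

-- ===== PORT A =====
-- A's loop body: state (res, start, now); branches in A's order.
def pvStepA (st : List String × Int × Int) (v : Int) : List String × Int × Int :=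
  match st with
  | (res, start, now) =>
    if v - now = 1 then (res, start, v)
    else ((res ++ [if start = now then PySem.Int.toStr now
                   else PySem.Int.toStr start ++ "-" ++ PySem.Int.toStr now]), v, v)

def contract_numbers (nums : List Int) : String :=
  match PySem.List.sorted nums (fun x => x) false with
  | [] => ""
  | x :: rest =>
    let st := rest.foldl pvStepA ([], x, x)
    PySem.Str.join ", " (st.1 ++ [if st.2.1 = st.2.2 then PySem.Int.toStr st.2.2
                                  else PySem.Int.toStr st.2.1 ++ "-" ++ PySem.Int.toStr st.2.2])

-- ===== PORT B =====
-- Source B's cut predicate: `i == 0 or i == n or s[i] - s[i-1] != 1` (short-circuit: s[i-1]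
-- is only reached for 1 ≤ i ≤ n-1, always in range, so Python s[j] = getD j 0 here).
def pvCutP (s : List Int) (n : Nat) (i : Nat) : Bool :=
  i == 0 || i == n || decide (s.getD i 0 - s.getD (i - 1) 0 ≠ 1)

def contract_numbers_alt (nums : List Int) : String :=
  let s := PySem.List.sorted nums (fun x => x) false
  let n := s.length
  let cuts := (List.range (n + 1)).filter (pvCutP s n)
  let parts := (cuts.zip cuts.tail).map (fun p =>
    let first := s.getD p.1 0
    let last := s.getD (p.2 - 1) 0
    if first = last then PySem.Int.toStr first
    else PySem.Int.toStr first ++ "-" ++ PySem.Int.toStr last)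
  PySem.Str.join ", " parts

-- ===== PRECONDITION & SPEC =====
def Spec_contract_numbers (nums : List Int) (out : String) : Prop := out = contract_numbers_alt nums
instance (nums : List Int) (out : String) : Decidable (Spec_contract_numbers nums out) := by unfold Spec_contract_numbers; infer_instance

-- ===== CLAIM (what is proved, stated in full; the proofs are below) =====
def Claim_equal_contract_numbers : Prop := ∀ (nums : List Int), Dom_contract_numbers nums → Spec_contract_numbers nums (contract_numbers nums)

-- ===== LEMMAS AND PROOFS =====

-- Reference grouping: `pvConsume start now l` = the runs of (start..now) ++ l.
def pvConsume (start now : Int) : List Int → List (Int × Int)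
  | [] => [(start, now)]
  | v :: l => if v - now = 1 then pvConsume start v l else (start, now) :: pvConsume v v l

def pvRuns : List Int → List (Int × Int)
  | [] => []
  | x :: t => pvConsume x x t

def pvFmt (p : Int × Int) : String :=
  if p.1 = p.2 then PySem.Int.toStr p.1
  else PySem.Int.toStr p.1 ++ "-" ++ PySem.Int.toStr p.2

-- index pair ↦ value pair, as Source B reads it
def pvVal (s : List Int) (p : Nat × Nat) : Int × Int := (s.getD p.1 0, s.getD (p.2 - 1) 0)

def pvR (s : List Int) : List Nat :=
  ((List.range s.length).map Nat.succ).filter (pvCutP s s.length)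

def pvVP (s : List Int) : List (Int × Int) :=
  (((0 :: pvR s).zip (pvR s))).map (pvVal s)

lemma pvFmt_eq (a b : Int) :
    (if a = b then PySem.Int.toStr b
     else PySem.Int.toStr a ++ "-" ++ PySem.Int.toStr b) = pvFmt (a, b) := by
  by_cases h : a = b
  · subst h; simp [pvFmt]
  · simp [pvFmt, h]

lemma pv_cuts_eq (s : List Int) :
    (List.range (s.length + 1)).filter (pvCutP s s.length) = 0 :: pvR s := by
  rw [List.range_succ_eq_map, List.filter_cons]
  simp [pvCutP, pvR]

lemma pv_r_mem_pos (s : List Int) : ∀ i ∈ pvR s, 1 ≤ i := by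
  intro i hi
  unfold pvR at hi
  have := List.of_mem_filter hi
  have hm := List.mem_of_mem_filter hi
  rcases List.mem_map.mp hm with ⟨j, _, rfl⟩
  omega

lemma pv_r_ne_nil (s : List Int) (h : s ≠ []) : pvR s ≠ [] := by
  have hlen : 1 ≤ s.length := by cases s with | nil => simp at h | cons a t => simp
  have : s.length ∈ pvR s := by
    unfold pvR
    refine List.mem_filter.mpr ⟨List.mem_map.mpr ⟨s.length - 1, ?_, by omega⟩, ?_⟩
    · exact List.mem_range.mpr (by omega)
    · simp [pvCutP]
  intro hnil; rw [hnil] at this; simp at this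

-- index shift: the cut predicate on x::t at i+2 is the predicate on t at i+1
lemma pv_cutP_shift (x : Int) (t : List Int) (i : Nat) :
    pvCutP (x :: t) (t.length + 1) (i + 2) = pvCutP t t.length (i + 1) := by
  simp only [pvCutP]
  have h1 : ((i + 2 : Nat) == 0) = false := by simp
  have h2 : ((i + 1 : Nat) == 0) = false := by simp
  have h3 : ((i + 2 : Nat) == t.length + 1) = ((i + 1 : Nat) == t.length) := by
    by_cases h : i + 1 = t.length
    · simp [h]
    · have h' : ¬ (i + 2 = t.length + 1) := by omega
      simp
  rw [h1, h2, h3]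
  rfl

lemma pv_r_cons (x : Int) (t : List Int) :
    pvR (x :: t)
      = (if pvCutP (x :: t) (t.length + 1) 1 then [1] else []) ++ (pvR t).map Nat.succ := by
  unfold pvR
  have hlen : (x :: t).length = t.length + 1 := rfl
  rw [hlen, List.range_succ_eq_map, List.map_cons, List.filter_cons,
      List.map_map, List.filter_map]
  have key : List.filter (pvCutP (x :: t) (t.length + 1) ∘ Nat.succ ∘ Nat.succ)
        (List.range t.length)
      = List.filter (pvCutP t t.length ∘ Nat.succ) (List.range t.length) :=
    List.filter_congr (fun i _ => pv_cutP_shift x t i)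
  rw [key]
  split_ifs <;> simp [List.map_map, List.filter_map]

-- the per-pair map over successor-shifted cut pairs of x::t equals the map over t's pairs
lemma pv_map_shift (x : Int) (t : List Int) (l : List Nat) (hpos : ∀ i ∈ l, 1 ≤ i) :
    ((l.map Nat.succ).zip ((l.map Nat.succ).tail)).map (pvVal (x :: t))
      = (l.zip l.tail).map (pvVal t) := by
  rw [← List.map_tail, List.zip_map, List.map_map]
  apply List.map_congr_left
  intro p hp
  have h2 : p.2 ∈ l.tail := (List.of_mem_zip hp).2
  have h2' : 1 ≤ p.2 := hpos _ (List.mem_of_mem_tail h2)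
  cases p with
  | mk a b =>
    simp only [Prod.map, Function.comp, pvVal]
    have : Nat.succ b - 1 = b := by omega
    rw [this]
    have hga : (x :: t).getD (Nat.succ a) 0 = t.getD a 0 := rfl
    have hgb : (x :: t).getD b 0 = t.getD (b - 1) 0 := by
      cases b with
      | zero => omega
      | succ b' => rfl
    rw [hga, hgb]

lemma pv_consume_shape (l : List Int) : ∀ now : Int, ∃ d g,
    ∀ a : Int, pvConsume a now l = (a, d) :: g := by
  induction l with
  | nil => intro now; exact ⟨now, [], fun a => rfl⟩
  | cons v l ih =>
    intro now
    by_cases h : v - now = 1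
    · rcases ih v with ⟨d, g, hdg⟩
      exact ⟨d, g, fun a => by simp [pvConsume, h, hdg a]⟩
    · exact ⟨now, pvConsume v v l, fun a => by simp [pvConsume, h]⟩

-- MAIN bridge: B's value pairs are the reference runs
lemma pv_vp_eq_runs (s : List Int) : pvVP s = pvRuns s := by
  induction s with
  | nil => rfl
  | cons x t ih =>
    have hr := pv_r_cons x t
    by_cases hc : pvCutP (x :: t) (t.length + 1) 1 = true
    · -- a cut at 1: x is a singleton run (t = [] or t's head ≠ x+1)
      rw [if_pos hc] at hr
      cases ht : t with
      | nil =>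
        subst ht
        simp [pvVP, pvR, pvRuns, pvConsume, pvCutP, pvVal]
      | cons y t' =>
        have hy : ¬ (y - x = 1) := by
          subst ht
          simp only [pvCutP] at hc
          have h1 : ((1 : Nat) == 0) = false := by simp
          have h2 : ((1 : Nat) == (y :: t').length + 1) = false := by simp
          rw [h1, h2] at hc
          simpa using hc
        subst ht
        unfold pvVP
        rw [hr]
        cases hrt : pvR (y :: t') with
        | nil => exact absurd hrt (pv_r_ne_nil _ (by simp))
        | cons b rt =>
          have htail : List.map (pvVal (x :: y :: t'))
                (((b :: rt).map Nat.succ).zip (((b :: rt).map Nat.succ).tail))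
              = List.map (pvVal (y :: t')) ((b :: rt).zip (b :: rt).tail) := by
            apply pv_map_shift
            intro i hi; exact pv_r_mem_pos _ i (hrt ▸ hi)
          have hb1 : 1 ≤ b := pv_r_mem_pos _ b (by rw [hrt]; exact List.mem_cons_self ..)
          have hv0 : pvVal (x :: y :: t') (0, 1) = (x, x) := by simp [pvVal]
          have hv1 : pvVal (x :: y :: t') (1, Nat.succ b) = pvVal (y :: t') (0, b) := by
            simp only [pvVal]
            have : Nat.succ b - 1 = b := by omega
            rw [this]
            have : (x :: y :: t').getD b 0 = (y :: t').getD (b - 1) 0 := by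
              cases b with
              | zero => omega
              | succ b' => rfl
            rw [this]
            rfl
          simp only [List.map_cons, List.tail_cons] at htail
          simp only [List.cons_append, List.nil_append, List.zip_cons_cons, List.map_cons]
          rw [hv0, hv1]
          have hvp : pvVP (y :: t')
              = pvVal (y :: t') (0, b) :: ((b :: rt).zip rt).map (pvVal (y :: t')) := by
            unfold pvVP; rw [hrt]; rfl
          have hstep : pvRuns (x :: y :: t') = (x, x) :: pvRuns (y :: t') := by
            simp [pvRuns, pvConsume, hy]
          rw [hstep, ← ih, hvp, htail]
    · -- no cut at 1: t = y :: t' with y = x+1, x merges into t's first run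
      rw [if_neg hc] at hr
      cases ht : t with
      | nil =>
        exfalso; subst ht
        apply hc
        simp [pvCutP]
      | cons y t' =>
        have hy : y - x = 1 := by
          subst ht
          simp only [pvCutP] at hc
          have h1 : ((1 : Nat) == 0) = false := by simp
          have h2 : ((1 : Nat) == (y :: t').length + 1) = false := by simp
          rw [h1, h2] at hc
          simpa using hc
        subst ht
        unfold pvVP
        rw [hr]
        cases hrt : pvR (y :: t') with
        | nil => exact absurd hrt (pv_r_ne_nil _ (by simp))
        | cons b rt =>
          have hb1 : 1 ≤ b := pv_r_mem_pos _ b (by rw [hrt]; exact List.mem_cons_self ..)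
          have hv0 : pvVal (x :: y :: t') (0, Nat.succ b)
              = (x, (pvVal (y :: t') (0, b)).2) := by
            simp only [pvVal]
            have : Nat.succ b - 1 = b := by omega
            rw [this]
            have : (x :: y :: t').getD b 0 = (y :: t').getD (b - 1) 0 := by
              cases b with
              | zero => omega
              | succ b' => rfl
            rw [this]
            rfl
          have htail : List.map (pvVal (x :: y :: t'))
                (((b :: rt).map Nat.succ).zip (((b :: rt).map Nat.succ).tail))
              = List.map (pvVal (y :: t')) ((b :: rt).zip (b :: rt).tail) := by
            apply pv_map_shift
            intro i hi; exact pv_r_mem_pos _ i (hrt ▸ hi)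
          simp only [List.map_cons, List.tail_cons, List.zip_cons_cons, List.nil_append] at htail ⊢
          rw [hv0]
          have hvp : pvVP (y :: t')
              = pvVal (y :: t') (0, b) :: ((b :: rt).zip rt).map (pvVal (y :: t')) := by
            unfold pvVP; rw [hrt]; rfl
          -- runs side: consume x x (y::t') = consume x y t', shape lemma
          rcases pv_consume_shape t' y with ⟨d, g, hdg⟩
          have hrx : pvRuns (x :: y :: t') = (x, d) :: g := by
            simp [pvRuns, pvConsume, hy, hdg x]
          have hry : pvRuns (y :: t') = (y, d) :: g := by
            simp [pvRuns, hdg y]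
          have hih : pvVal (y :: t') (0, b) = (y, d)
              ∧ ((b :: rt).zip rt).map (pvVal (y :: t')) = g := by
            have h0 := ih
            rw [hvp, hry] at h0
            exact ⟨(List.cons_eq_cons.mp h0).1, (List.cons_eq_cons.mp h0).2⟩
          rw [hrx, htail, hih.2, hih.1]

-- A's loop in terms of the reference runs
lemma pv_A_loop (l : List Int) : ∀ (res : List String) (start now : Int),
    (l.foldl pvStepA (res, start, now)).1
      ++ [pvFmt ((l.foldl pvStepA (res, start, now)).2.1,
                 (l.foldl pvStepA (res, start, now)).2.2)]
      = res ++ (pvConsume start now l).map pvFmt := by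
  induction l with
  | nil => intro res start now; simp [pvConsume]
  | cons v l ih =>
    intro res start now
    by_cases h : v - now = 1
    · simp only [List.foldl_cons, pvStepA, if_pos h, pvConsume]
      exact ih res start v
    · simp only [List.foldl_cons, pvStepA, if_neg h, pvConsume]
      rw [ih _ v v, pvFmt_eq]
      simp

-- ===== VERDICT (by name: the statement is the Claim_ definition above) =====
theorem contract_numbers_spec : Claim_equal_contract_numbers := by
  intro nums _
  unfold Spec_contract_numbers contract_numbers contract_numbers_alt
  simp only [pv_cuts_eq]
  cases h : PySem.List.sorted nums (fun x => x) false with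
  | nil =>
    have : pvR ([] : List Int) = [] := rfl
    rw [this]
    rfl
  | cons x rest =>
    simp only [List.tail_cons]
    have hparts : ((0 :: pvR (x :: rest)).zip (pvR (x :: rest))).map
        (fun p => if (x :: rest).getD p.1 0 = (x :: rest).getD (p.2 - 1) 0
                  then PySem.Int.toStr ((x :: rest).getD p.1 0)
                  else PySem.Int.toStr ((x :: rest).getD p.1 0) ++ "-"
                       ++ PySem.Int.toStr ((x :: rest).getD (p.2 - 1) 0))
        = (pvVP (x :: rest)).map pvFmt := by
      unfold pvVP
      rw [List.map_map]
      apply List.map_congr_left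
      intro p _
      simp [pvVal, pvFmt]
    have hA := pv_A_loop rest [] x x
    simp only [List.nil_append] at hA
    congr 1
    rw [pvFmt_eq, hA, hparts, pv_vp_eq_runs]
    rfl
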